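-- pv_equiv track=rewrite | github.com/jannajchan/python | forMyKnowledge/EX-Number-BinaryDecimal.py | invert_bits
-- ===== SOURCE A (Python) =====
-- def invert_bits(binary_str: str) -> str:
--     invert_bits = ""
--     for i in range(len(binary_str)):
--         if binary_str[i] == "1":
--             invert_bits += "0"
--         elif binary_str[i] == "0":
--             invert_bits += "1"
--         else:
--             return "Invalid binary string format."
--     return invert_bits
-- ===== SOURCE B (Python) =====
-- _TBL = str.maketrans("10", "01")
--
-- def invert_bits(binary_str: str) -> str:
--     if not all(c in "01" for c in binary_str):
--         return "Invalid binary string format."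
--     return binary_str.translate(_TBL)
-- ===== Notes on version B (the rewrite author's own statement) =====
-- stated objective: idiomatic
-- what changed: Replaces the single indexed loop with early return and string accumulation by a separate whole-string validation pass (all()) followed by a table-driven str.translate of the valid string.
import Mathlib
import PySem

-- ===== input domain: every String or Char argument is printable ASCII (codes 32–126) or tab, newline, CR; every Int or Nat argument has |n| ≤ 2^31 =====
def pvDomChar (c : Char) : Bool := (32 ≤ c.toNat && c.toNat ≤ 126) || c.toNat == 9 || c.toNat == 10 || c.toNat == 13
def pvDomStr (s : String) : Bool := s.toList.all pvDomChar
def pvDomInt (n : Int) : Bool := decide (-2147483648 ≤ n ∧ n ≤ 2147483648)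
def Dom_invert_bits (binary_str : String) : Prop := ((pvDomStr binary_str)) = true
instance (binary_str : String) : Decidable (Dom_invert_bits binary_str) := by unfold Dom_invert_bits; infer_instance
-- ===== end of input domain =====

-- B separates validation (an all()-scan) from transformation (a translation map); return-value equivalence.
-- ===== PORT A =====
-- loop of A: builds the inverted string char by char, returning the error string on the first bad char
def invertA : List Char → List Char → String
  | [], acc => String.mk acc
  | c :: cs, acc =>
    if c = '1' then invertA cs (acc ++ ['0'])
    else if c = '0' then invertA cs (acc ++ ['1'])
    else "Invalid binary string format."

def invert_bits (binary_str : String) : String :=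
  invertA binary_str.toList []

-- ===== PORT B =====
-- translation table of B: '1' ↦ '0', '0' ↦ '1', anything else unchanged
def tblB (c : Char) : Char :=
  if c = '1' then '0' else if c = '0' then '1' else c

def invert_bits_alt (binary_str : String) : String :=
  if binary_str.toList.all (fun c => c = '0' ∨ c = '1') then
    String.mk (binary_str.toList.map tblB)
  else
    "Invalid binary string format."

-- ===== PRECONDITION & SPEC =====
def Spec_invert_bits (binary_str : String) (out : String) : Prop := out = invert_bits_alt binary_str
instance (binary_str : String) (out : String) : Decidable (Spec_invert_bits binary_str out) := by unfold Spec_invert_bits; infer_instance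

-- ===== CLAIM (what is proved, stated in full; the proofs are below) =====
def Claim_equal_invert_bits : Prop := ∀ (binary_str : String), Dom_invert_bits binary_str → Spec_invert_bits binary_str (invert_bits binary_str)

-- ===== LEMMAS AND PROOFS =====

-- ===== VERDICT (by name: the statement is the Claim_ definition above) =====
theorem invertA_eq (l acc : List Char) :
    invertA l acc =
      if l.all (fun c => c = '0' ∨ c = '1') then String.mk (acc ++ l.map tblB)
      else "Invalid binary string format." := by
  induction l generalizing acc with
  | nil => simp [invertA]
  | cons c cs ih =>
    by_cases h1 : c = '1'
    · simp [invertA, h1, ih, tblB]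
    · by_cases h0 : c = '0'
      · simp [invertA, h0, ih, tblB]
      · simp [invertA, h1, h0]

theorem invert_bits_spec : Claim_equal_invert_bits := by
  intro s _
  unfold Spec_invert_bits invert_bits invert_bits_alt
  rw [invertA_eq]
  simp
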